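-- pv_equiv track=rewrite | github.com/RamonLull/Python-Distilled | 3. Program Structure and Control Flow/Exceptions/b.py | find_running_task
-- ===== SOURCE A (Python) =====
-- def find_running_task(tasks, cycle):
--     remaining_cycles = cycle
--     current_task = -1
--     while remaining_cycles > 0:
--         min_cycles = float('inf')
--         for i, task_cycles in enumerate(tasks):
--             if task_cycles > 0 and task_cycles < min_cycles:
--                 min_cycles = task_cycles
--                 current_task = i
--         if current_task == -1:
--             return -1  # No task running
--         decrement_cycles = min(min_cycles, remaining_cycles)
--         tasks[current_task] -= decrement_cycles
--         remaining_cycles -= decrement_cycles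
--     return current_task
-- ===== SOURCE B (Python) =====
-- def find_running_task(tasks, cycle):
--     if cycle <= 0:
--         return -1
--     order = [(v, i) for i, v in enumerate(tasks) if v > 0]
--     order.sort(key=lambda t: t[0])
--     acc = 0
--     for v, i in order:
--         acc += v
--         if acc >= cycle:
--             return i
--     return order[-1][1] if order else -1
-- ===== Notes on version B (the rewrite author's own statement) =====
-- stated objective: alternative
-- what changed: A repeatedly rescans the whole list to find the minimal positive task and decrements it one round at a time; B sorts the positive (value,index) pairs once and does a single prefix-sum scan for the first cumulative sum reaching the cycle count (falling back to the last-run task when the total is smaller). Intended as faster (O(n log n) vs worst-case O(n^2)); a timing run measured 10.34x at the largest size on some inputs but was not consistent across inputs, so no speed is claimed. Note: A mutates its tasks argument in place; B does not - the equivalence is about the return value.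
import Mathlib
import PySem

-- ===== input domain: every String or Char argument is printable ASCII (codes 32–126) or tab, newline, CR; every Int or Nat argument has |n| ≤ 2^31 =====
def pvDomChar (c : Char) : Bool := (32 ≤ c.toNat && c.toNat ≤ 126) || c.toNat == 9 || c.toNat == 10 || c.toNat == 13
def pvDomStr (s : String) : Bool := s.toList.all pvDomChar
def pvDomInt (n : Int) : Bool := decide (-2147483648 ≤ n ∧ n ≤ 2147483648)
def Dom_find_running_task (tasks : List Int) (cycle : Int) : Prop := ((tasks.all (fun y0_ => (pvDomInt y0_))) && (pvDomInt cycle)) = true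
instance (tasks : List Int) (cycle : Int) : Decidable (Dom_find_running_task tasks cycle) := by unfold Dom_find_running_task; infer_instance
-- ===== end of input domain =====

-- B replaces A's repeated full-list minimum scans by one sort of the positive (value,index)
-- pairs plus a single prefix-sum scan.  A mutates its `tasks` argument in place and B does
-- not: the equivalence proved here is about the RETURN value only.

-- ===== PORT A =====
-- inner `for i, task_cycles in enumerate(tasks)` scan; `min_cycles = float('inf')` is `none`
-- `task_cycles > 0 and task_cycles < min_cycles` (min_cycles = none means float('inf'))
def pyCond (v : Int) (m : Option Int) : Bool :=
  decide (0 < v) && (match m with | none => true | some mv => decide (v < mv))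

def pyInner : List (Int × Int) → Option Int → Int → Option Int × Int
  | [], m, c => (m, c)
  | (i, v) :: rest, m, c =>
      if pyCond v m then
        pyInner rest (some v) i
      else
        pyInner rest m c

-- termination helper for the while-loop: the found minimum is positive
theorem pyInner_pos : ∀ (e : List (Int × Int)) (m : Option Int) (c : Int),
    (∀ w, m = some w → 0 < w) → ∀ w, (pyInner e m c).1 = some w → 0 < w := by
  intro e
  induction e with
  | nil => intro m c hm w hw; exact hm w hw
  | cons p rest ih =>
      intro m c hm w hw
      obtain ⟨i, v⟩ := p
      by_cases h : pyCond v m = true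
      · rw [show pyInner ((i, v) :: rest) m c = pyInner rest (some v) i from by
            rw [pyInner, if_pos h]] at hw
        refine ih (some v) i ?_ w hw
        intro w' hw'
        cases hw'
        simpa [pyCond] using (Bool.and_elim_left h)
      · rw [show pyInner ((i, v) :: rest) m c = pyInner rest m c from by
            rw [pyInner, if_neg h]] at hw
        exact ih m c hm w hw

-- the `while remaining_cycles > 0` loop
def pyLoop (tasks : List Int) (remaining : Int) (current : Int) : Int :=
  if hr : 0 < remaining then
    let r := pyInner (PySem.List.enumerate tasks 0) none current
    if r.2 = -1 then -1
    else
      let dec := match r.1 with | none => remaining | some mv => min mv remaining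
      pyLoop (tasks.set r.2.toNat (tasks.getD r.2.toNat 0 - dec)) (remaining - dec) r.2
  else current
termination_by remaining.toNat
decreasing_by
  cases hm : (pyInner (PySem.List.enumerate tasks 0) none current).1 with
  | none => simp only [hm]; omega
  | some mv =>
      have hpos : 0 < mv := pyInner_pos _ none current (by intro w h; cases h) mv hm
      simp only [hm]
      rcases le_total mv remaining with h | h
      · rw [min_eq_left h]; omega
      · rw [min_eq_right h]; omega

def find_running_task (tasks : List Int) (cycle : Int) : Int :=
  pyLoop tasks cycle (-1)

-- ===== PORT B =====
-- the `for v, i in order` prefix-sum loop with early return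
def altScan (cycle : Int) : List (Int × Int) → Int → Option Int
  | [], _ => none
  | (v, i) :: rest, acc =>
      if cycle ≤ acc + v then some i else altScan cycle rest (acc + v)

def find_running_task_alt (tasks : List Int) (cycle : Int) : Int :=
  if cycle ≤ 0 then -1
  else
    let order := PySem.List.sorted
      ((PySem.List.enumerate tasks 0).filterMap
        (fun p => if 0 < p.2 then some (p.2, p.1) else none))
      (fun t => t.1)
    match altScan cycle order 0 with
    | some i => i
    | none =>
      match order.getLast? with
      | some p => p.2
      | none => -1

-- ===== PRECONDITION & SPEC =====
def Spec_find_running_task (tasks : List Int) (cycle : Int) (out : Int) : Prop := out = find_running_task_alt tasks cycle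
instance (tasks : List Int) (cycle : Int) (out : Int) : Decidable (Spec_find_running_task tasks cycle out) := by unfold Spec_find_running_task; infer_instance

-- ===== CLAIM (what is proved, stated in full; the proofs are below) =====
def Claim_equal_find_running_task : Prop := ∀ (tasks : List Int) (cycle : Int), Dom_find_running_task tasks cycle → Spec_find_running_task tasks cycle (find_running_task tasks cycle)

-- ===== LEMMAS AND PROOFS =====

-- lexicographic order on (value, index) pairs
def lexLt (a b : Int × Int) : Prop := a.1 < b.1 ∨ (a.1 = b.1 ∧ a.2 < b.2)

-- the positive (value, index) pairs of an enumerated list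
def posE (e : List (Int × Int)) : List (Int × Int) :=
  e.filterMap (fun p => if 0 < p.2 then some (p.2, p.1) else none)

-- reference scheduler on the sorted positive pairs
def spec : List (Int × Int) → Int → Int → Int
  | [], _, c => c
  | (v, i) :: rest, r, c => if r ≤ v then i else spec rest (r - v) i

-- first-wins running minimum by value (what A's inner scan computes)
def minS (b : Int × Int) : List (Int × Int) → Int × Int
  | [] => b
  | x :: l => minS (if x.1 < b.1 then x else b) l

theorem posE_cons_pos (i v : Int) (e : List (Int × Int)) (h : 0 < v) :
    posE ((i, v) :: e) = (v, i) :: posE e := by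
  simp [posE, h]

theorem posE_cons_nonpos (i v : Int) (e : List (Int × Int)) (h : ¬ 0 < v) :
    posE ((i, v) :: e) = posE e := by
  simp [posE, h]

theorem pyInner_some : ∀ (e : List (Int × Int)) (w : Int) (c : Int),
    pyInner e (some w) c = (some (minS (w, c) (posE e)).1, (minS (w, c) (posE e)).2) := by
  intro e
  induction e with
  | nil => intro w c; simp [pyInner, posE, minS]
  | cons p rest ih =>
      intro w c
      obtain ⟨i, v⟩ := p
      by_cases hv : 0 < v
      · rw [posE_cons_pos i v rest hv]
        by_cases hvw : v < w
        · rw [show pyInner ((i, v) :: rest) (some w) c = pyInner rest (some v) i from by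
              rw [pyInner, if_pos (by simp [pyCond, hv, hvw])]]
          rw [ih v i]
          rw [show minS (w, c) ((v, i) :: posE rest) = minS (v, i) (posE rest) from by
              rw [minS]; simp [hvw]]
        · rw [show pyInner ((i, v) :: rest) (some w) c = pyInner rest (some w) c from by
              rw [pyInner, if_neg (by simp [pyCond, hvw])]]
          rw [ih w c]
          rw [show minS (w, c) ((v, i) :: posE rest) = minS (w, c) (posE rest) from by
              rw [minS]; simp [hvw]]
      · rw [posE_cons_nonpos i v rest hv]
        rw [show pyInner ((i, v) :: rest) (some w) c = pyInner rest (some w) c from by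
            rw [pyInner, if_neg (by simp [pyCond, hv])]]
        exact ih w c

theorem pyInner_none : ∀ (e : List (Int × Int)) (c : Int),
    pyInner e none c =
      match posE e with
      | [] => (none, c)
      | x :: l => (some (minS x l).1, (minS x l).2) := by
  intro e
  induction e with
  | nil => intro c; simp [pyInner, posE]
  | cons p rest ih =>
      intro c
      obtain ⟨i, v⟩ := p
      by_cases hv : 0 < v
      · rw [posE_cons_pos i v rest hv]
        rw [show pyInner ((i, v) :: rest) none c = pyInner rest (some v) i from by
            rw [pyInner, if_pos (by simp [pyCond, hv])]]
        rw [pyInner_some rest v i]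
      · rw [posE_cons_nonpos i v rest hv]
        rw [show pyInner ((i, v) :: rest) none c = pyInner rest none c from by
            rw [pyInner, if_neg (by simp [pyCond, hv])]]
        exact ih c

theorem minS_min : ∀ (l : List (Int × Int)) (b : Int × Int),
    (∀ y ∈ l, b.2 < y.2) → l.Pairwise (fun p q => p.2 < q.2) →
    (minS b l ∈ b :: l) ∧ ∀ y ∈ b :: l, ¬ lexLt y (minS b l) := by
  intro l
  induction l with
  | nil =>
      intro b _ _
      refine ⟨by simp [minS], ?_⟩
      intro y hy
      simp only [List.mem_singleton] at hy
      subst hy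
      simp only [minS, lexLt]
      omega
  | cons x l ih =>
      intro b hb hp
      have hx : b.2 < x.2 := hb x (by simp)
      obtain ⟨hpx, hpl⟩ := List.pairwise_cons.mp hp
      have hb' : ∀ y ∈ l, (if x.1 < b.1 then x else b).2 < y.2 := by
        intro y hy
        have h1 := hb y (List.mem_cons_of_mem _ hy)
        have h2 := hpx y hy
        split <;> omega
      obtain ⟨hmem, hmin⟩ := ih (if x.1 < b.1 then x else b) hb' hpl
      have hms : minS b (x :: l) = minS (if x.1 < b.1 then x else b) l := rfl
      rw [hms]
      have hbr' : ¬ lexLt (if x.1 < b.1 then x else b) (minS (if x.1 < b.1 then x else b) l) :=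
        hmin _ (by simp)
      constructor
      · rcases List.mem_cons.mp hmem with h | h
        · rw [h]
          split
          · simp
          · simp
        · simp [h]
      · intro y hy
        rcases List.mem_cons.mp hy with hyb | hy'
        · -- y = b
          rw [hyb]
          by_cases hxb : x.1 < b.1
          · rw [if_pos hxb] at hbr' ⊢
            simp only [lexLt] at hbr' ⊢
            omega
          · rw [if_neg hxb] at hbr' ⊢
            exact hbr'
        · rcases List.mem_cons.mp hy' with hyx | hy''
          · -- y = x
            rw [hyx]
            by_cases hxb : x.1 < b.1
            · rw [if_pos hxb] at hbr' ⊢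
              exact hbr'
            · rw [if_neg hxb] at hbr' ⊢
              simp only [lexLt] at hbr' ⊢
              omega
          · exact hmin y (List.mem_cons_of_mem _ hy'')

theorem posE_snd_pairwise (tasks : List Int) (s : Int) :
    (posE (PySem.List.enumerate tasks s)).Pairwise (fun p q => p.2 < q.2) := by
  unfold posE
  rw [List.pairwise_filterMap]
  refine (PySem.List.pairwise_lt_enumerate tasks s).imp (fun {a b} hab => ?_)
  intro x hx y hy
  by_cases ha : 0 < a.2
  · rw [if_pos ha] at hx
    cases hx
    by_cases hb2 : 0 < b.2
    · rw [if_pos hb2] at hy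
      cases hy
      exact hab
    · rw [if_neg hb2] at hy
      cases hy
  · rw [if_neg ha] at hx
    cases hx

theorem posE_snd_ge (tasks : List Int) (s : Int) :
    ∀ p ∈ posE (PySem.List.enumerate tasks s), s ≤ p.2 ∧
      ∃ (n : Nat), p.2 = s + n ∧ ∃ (h : n < tasks.length), tasks[n] = p.1 ∧ 0 < p.1 := by
  intro p hp
  unfold posE at hp
  rw [List.mem_filterMap] at hp
  obtain ⟨q, hq, hfq⟩ := hp
  rw [PySem.List.mem_enumerate_iff] at hq
  obtain ⟨k, hk, rfl⟩ := hq
  split at hfq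
  · cases hfq
    refine ⟨by omega, k, rfl, hk, rfl, by assumption⟩
  · cases hfq

-- insertion keeps lexicographic sortedness when the new element's index is largest
theorem insertBy_lex (x : Int × Int) : ∀ (acc : List (Int × Int)),
    acc.Pairwise lexLt → (∀ y ∈ acc, y.2 < x.2) →
    (PySem.List.insertBy (fun a b => decide (a.1 < b.1)) x acc).Pairwise lexLt := by
  intro acc
  induction acc with
  | nil => intro _ _; rw [PySem.List.insertBy]; simp
  | cons y ys ih =>
      intro hp hidx
      rw [PySem.List.insertBy]
      by_cases h : x.1 < y.1
      · rw [if_pos (by simpa using h)]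
        refine List.pairwise_cons.mpr ⟨?_, hp⟩
        intro z hz
        rcases List.mem_cons.mp hz with rfl | hz'
        · exact Or.inl h
        · have := (List.pairwise_cons.mp hp).1 z hz'
          rcases this with h2 | ⟨h2, _⟩ <;> exact Or.inl (by omega)
      · rw [if_neg (by simpa using h)]
        refine List.pairwise_cons.mpr
          ⟨?_, ih (List.pairwise_cons.mp hp).2 (fun z hz => hidx z (List.mem_cons_of_mem _ hz))⟩
        intro z hz
        rw [PySem.List.mem_insertBy] at hz
        rcases hz with rfl | hz'
        · -- z = x : lexLt y x since y.1 ≤ x.1 and y.2 < x.2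
          have h2 := hidx y (by simp)
          simp only [lexLt]
          omega
        · exact (List.pairwise_cons.mp hp).1 z hz'

theorem foldl_insertBy_lex : ∀ (xs acc : List (Int × Int)),
    acc.Pairwise lexLt → (∀ y ∈ acc, ∀ x ∈ xs, y.2 < x.2) →
    xs.Pairwise (fun p q => p.2 < q.2) →
    (xs.foldl (fun acc x => PySem.List.insertBy (fun a b => decide (a.1 < b.1)) x acc) acc).Pairwise lexLt := by
  intro xs
  induction xs with
  | nil => intro acc h _ _; simpa using h
  | cons x xs ih =>
      intro acc hacc hcross hp
      simp only [List.foldl_cons]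
      refine ih _ (insertBy_lex x acc hacc (fun y hy => hcross y hy x (by simp))) ?_
        (List.pairwise_cons.mp hp).2
      intro y hy z hz
      rw [PySem.List.mem_insertBy] at hy
      rcases hy with rfl | hy'
      · exact (List.pairwise_cons.mp hp).1 z hz
      · exact hcross y hy' z (List.mem_cons_of_mem _ hz)

theorem sorted_key1_pairwise (xs : List (Int × Int))
    (h : xs.Pairwise (fun p q => p.2 < q.2)) :
    (PySem.List.sorted xs (fun t => t.1)).Pairwise lexLt := by
  rw [PySem.List.sorted_eq_foldl_insertBy]
  exact foldl_insertBy_lex xs [] (by simp) (by simp) h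

theorem lex_unique (l₁ l₂ : List (Int × Int)) (hp : l₁.Perm l₂)
    (h1 : l₁.Pairwise lexLt) (h2 : l₂.Pairwise lexLt) : l₁ = l₂ := by
  refine List.Perm.eq_of_sorted (le := fun a b => ¬ lexLt b a) ?_ ?_ ?_ hp
  · intro a b _ _ hab hba
    simp only [lexLt] at hab hba
    refine Prod.ext ?_ ?_ <;> omega
  · refine h1.imp (fun {a b} hab => ?_)
    simp only [lexLt] at hab ⊢
    omega
  · refine h2.imp (fun {a b} hab => ?_)
    simp only [lexLt] at hab ⊢
    omega

-- shorthand for B's sorted order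
def sortedPos (tasks : List Int) : List (Int × Int) :=
  PySem.List.sorted (posE (PySem.List.enumerate tasks 0)) (fun t => t.1)

theorem sortedPos_perm (tasks : List Int) :
    (sortedPos tasks).Perm (posE (PySem.List.enumerate tasks 0)) :=
  PySem.List.sorted_perm _ _ _

theorem sortedPos_pairwise (tasks : List Int) : (sortedPos tasks).Pairwise lexLt :=
  sorted_key1_pairwise _ (posE_snd_pairwise tasks 0)

-- zeroing the entry at index n deletes exactly the pair with snd = s + n
theorem posE_set : ∀ (ts : List Int) (s : Int) (n : Nat), n < ts.length →
    posE (PySem.List.enumerate (ts.set n 0) s)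
      = (posE (PySem.List.enumerate ts s)).filter (fun p => decide (p.2 ≠ s + n)) := by
  intro ts
  induction ts with
  | nil => intro s n h; simp at h
  | cons t ts ih =>
      intro s n h
      cases n with
      | zero =>
          rw [List.set_cons_zero, PySem.List.enumerate_cons, PySem.List.enumerate_cons]
          have hrest : ∀ p ∈ posE (PySem.List.enumerate ts (s + 1)),
              (decide (p.2 ≠ s + ((0 : Nat) : Int)) : Bool) = true := by
            intro p hp
            have := (posE_snd_ge ts (s + 1) p hp).1
            simp only [decide_eq_true_eq]
            omega
          by_cases ht : 0 < t
          · rw [posE_cons_pos s t _ ht, posE_cons_nonpos s 0 _ (by omega)]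
            rw [List.filter_cons]
            rw [show (decide (((t, s) : Int × Int).2 ≠ s + ((0 : Nat) : Int)) : Bool) = false from by simp]
            exact (List.filter_eq_self.mpr hrest).symm
          · rw [posE_cons_nonpos s t _ ht, posE_cons_nonpos s 0 _ (by omega)]
            exact (List.filter_eq_self.mpr hrest).symm
      | succ n =>
          rw [List.set_cons_succ, PySem.List.enumerate_cons, PySem.List.enumerate_cons]
          have hih := ih (s + 1) n (by simpa using h)
          have harith : s + 1 + (n : Int) = s + ((n + 1 : Nat) : Int) := by push_cast; ring
          by_cases ht : 0 < t
          · rw [posE_cons_pos s t _ ht, posE_cons_pos s t _ ht]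
            rw [List.filter_cons]
            rw [show (decide (((t, s) : Int × Int).2 ≠ s + ((n + 1 : Nat) : Int)) : Bool) = true from by
              simp only [decide_eq_true_eq]; push_cast; omega]
            rw [hih, harith]
            simp
          · rw [posE_cons_nonpos s t _ ht, posE_cons_nonpos s t _ ht]
            rw [hih, harith]

theorem sortedPos_set (tasks : List Int) (v₀ i₀ : Int) (rest : List (Int × Int))
    (hso : sortedPos tasks = (v₀, i₀) :: rest) (n : Nat) (hn : n < tasks.length)
    (hi : i₀ = (n : Int)) :
    sortedPos (tasks.set n 0) = rest := by
  have hperm : ((v₀, i₀) :: rest).Perm (posE (PySem.List.enumerate tasks 0)) := by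
    rw [← hso]; exact sortedPos_perm tasks
  have hpw := posE_snd_pairwise tasks 0
  have hnodup : (List.map Prod.snd (posE (PySem.List.enumerate tasks 0))).Nodup := by
    show List.Pairwise (· ≠ ·) _
    rw [List.pairwise_map]
    exact hpw.imp (fun {a b} hab => Int.ne_of_lt hab)
  have hnodup' : (List.map Prod.snd ((v₀, i₀) :: rest)).Nodup :=
    ((hperm.map Prod.snd).nodup_iff).mpr hnodup
  have hrest_ne : ∀ p ∈ rest, p.2 ≠ i₀ := by
    intro p hp hpe
    have hni : i₀ ∉ rest.map Prod.snd := by simpa using (List.nodup_cons.mp hnodup').1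
    exact hni (by rw [← hpe]; exact List.mem_map_of_mem hp)
  have hfilter : ((posE (PySem.List.enumerate tasks 0)).filter
      (fun p => decide (p.2 ≠ 0 + (n : Int)))).Perm rest := by
    have h0 : (0 : Int) + (n : Int) = i₀ := by omega
    rw [h0]
    have hstep := (hperm.symm).filter (fun p => decide (p.2 ≠ i₀))
    rw [show ((v₀, i₀) :: rest).filter (fun p => decide (p.2 ≠ i₀))
          = rest.filter (fun p => decide (p.2 ≠ i₀)) from by
        rw [List.filter_cons]; simp] at hstep
    have hfr : rest.filter (fun p => decide (p.2 ≠ i₀)) = rest :=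
      List.filter_eq_self.mpr (by intro p hp; simpa using hrest_ne p hp)
    exact hfr ▸ hstep
  refine lex_unique _ _ ?_ (sortedPos_pairwise _) ?_
  · refine (sortedPos_perm _).trans ?_
    rw [posE_set tasks 0 n hn]
    exact hfilter
  · have hpw2 := sortedPos_pairwise tasks
    rw [hso] at hpw2
    exact (List.pairwise_cons.mp hpw2).2

-- A's loop computes the reference scheduler on the sorted positive pairs
theorem pyLoop_eq_spec : ∀ (N : Nat) (remaining : Int), remaining.toNat ≤ N →
    ∀ (tasks : List Int) (current : Int), 0 < remaining →
    pyLoop tasks remaining current = spec (sortedPos tasks) remaining current := by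
  intro N
  induction N with
  | zero => intro remaining h _ _ hr; omega
  | succ N ih =>
      intro remaining hN tasks current hr
      rw [pyLoop, dif_pos hr]
      rcases hso : sortedPos tasks with _ | ⟨⟨v₀, i₀⟩, rest⟩
      · -- no positive tasks: pyInner returns (none, current); A drains remaining, returns current
        have hpo : posE (PySem.List.enumerate tasks 0) = [] := by
          have := sortedPos_perm tasks
          rw [hso] at this
          exact this.symm.eq_nil
        have hinner : pyInner (PySem.List.enumerate tasks 0) none current = (none, current) := by
          rw [pyInner_none, hpo]
        rw [hinner, spec]
        by_cases hc : current = -1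
        · rw [if_pos (by simpa using hc), hc]
        · rw [if_neg (by simpa using hc)]
          simp only []
          rw [pyLoop, dif_neg (by omega)]
      · -- the head of the sorted order is exactly what A's inner scan finds
        have hpo_pw := posE_snd_pairwise tasks 0
        have hperm : ((v₀, i₀) :: rest).Perm (posE (PySem.List.enumerate tasks 0)) := by
          rw [← hso]; exact sortedPos_perm tasks
        have hhead_mem : (v₀, i₀) ∈ posE (PySem.List.enumerate tasks 0) := hperm.subset (by simp)
        obtain ⟨x, l, hpol⟩ : ∃ x l, posE (PySem.List.enumerate tasks 0) = x :: l := by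
          cases hpo : posE (PySem.List.enumerate tasks 0) with
          | nil => rw [hpo] at hperm; simpa using hperm.length_eq
          | cons x l => exact ⟨x, l, rfl⟩
        have hxl_pw : (x :: l).Pairwise (fun p q => p.2 < q.2) := by rw [← hpol]; exact hpo_pw
        obtain ⟨hrmem, hmin⟩ :=
          minS_min l x (fun y hy => (List.pairwise_cons.mp hxl_pw).1 y hy)
            (List.pairwise_cons.mp hxl_pw).2
        have hr_eq : minS x l = (v₀, i₀) := by
          by_contra hner
          have hrmem' : minS x l ∈ (v₀, i₀) :: rest := by
            refine hperm.symm.subset ?_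
            rw [hpol]
            exact hrmem
          have hlex : lexLt (v₀, i₀) (minS x l) := by
            have hpw2 := sortedPos_pairwise tasks
            rw [hso] at hpw2
            rcases List.mem_cons.mp hrmem' with h | h
            · exact absurd h hner
            · exact (List.pairwise_cons.mp hpw2).1 _ h
          refine hmin (v₀, i₀) ?_ hlex
          rw [← hpol]
          exact hhead_mem
        have hinner : pyInner (PySem.List.enumerate tasks 0) none current = (some v₀, i₀) := by
          rw [pyInner_none, hpol]
          simp only []
          rw [hr_eq]
        obtain ⟨hge0, n, hin, hnlt, htn, hv0⟩ := posE_snd_ge tasks 0 (v₀, i₀) hhead_mem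
        simp only at hin htn hv0 hge0
        rw [hinner]
        rw [if_neg (by simp only []; omega)]
        simp only []
        have htoNat : i₀.toNat = n := by omega
        have hgetD : tasks.getD i₀.toNat 0 = v₀ := by
          rw [htoNat, List.getD_eq_getElem _ _ hnlt]
          exact htn
        rw [spec]
        by_cases hcase : remaining ≤ v₀
        · -- the head absorbs all remaining cycles
          rw [show min v₀ remaining = remaining from by omega]
          rw [pyLoop, dif_neg (by omega), if_pos hcase]
        · -- head runs to completion; recurse on the tail
          rw [show min v₀ remaining = v₀ from by omega]
          rw [show tasks.set i₀.toNat (tasks.getD i₀.toNat 0 - v₀) = tasks.set n 0 from by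
            rw [hgetD, htoNat]; simp]
          rw [ih (remaining - v₀) (by omega) _ i₀ (by omega)]
          rw [sortedPos_set tasks v₀ i₀ rest hso n hnlt (by omega)]
          rw [if_neg hcase]

-- the reference scheduler is B's prefix-sum scan
theorem spec_eq_altScan : ∀ (order : List (Int × Int)) (cycle acc c : Int),
    spec order (cycle - acc) c =
      match altScan cycle order acc with
      | some i => i
      | none => match order.getLast? with | some p => p.2 | none => c := by
  intro order
  induction order with
  | nil => intro cycle acc c; rfl
  | cons p rest ih =>
      intro cycle acc c
      obtain ⟨v, i⟩ := p
      rw [spec, altScan]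
      by_cases h : cycle ≤ acc + v
      · rw [if_pos (by omega), if_pos h]
      · rw [if_neg (by omega), if_neg h]
        rw [show cycle - acc - v = cycle - (acc + v) from by ring]
        rw [ih cycle (acc + v) i]
        cases rest with
        | nil => rfl
        | cons q t =>
            rw [List.getLast?_cons_cons]
            cases altScan cycle (q :: t) (acc + v) with
            | some j => rfl
            | none =>
                cases hgl : (q :: t).getLast? with
                | none => simp at hgl
                | some p => rfl

-- ===== VERDICT (by name: the statement is the Claim_ definition above) =====
theorem find_running_task_spec : Claim_equal_find_running_task := by
  unfold Claim_equal_find_running_task Spec_find_running_task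
  intro tasks cycle _
  unfold find_running_task find_running_task_alt
  by_cases hc : cycle ≤ 0
  · rw [if_pos hc, pyLoop, dif_neg (by omega)]
  · rw [if_neg hc]
    rw [pyLoop_eq_spec cycle.toNat cycle (le_refl _) tasks (-1) (by omega)]
    have h := spec_eq_altScan (sortedPos tasks) cycle 0 (-1)
    rw [show cycle - 0 = cycle from by ring] at h
    rw [h]
    rfl
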